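-- pv_equiv track=rewrite | github.com/tb-team-dev-2/bittensor-drand | tests/test_commit_reveal.py | compute_expected_reveal_round
-- ===== SOURCE A (Python) =====
-- SUBTENSOR_PULSE_DELAY = 24
--
-- PERIOD = 3  # Drand period in seconds
--
-- GENESIS_TIME = 1692803367
--
-- def compute_expected_reveal_round(
--     now: int,
--     tempo: int,
--     current_block: int,
--     netuid: int,
--     subnet_reveal_period_epochs: int,
--     block_time: int,
-- ):
--     tempo_plus_one = tempo + 1
--     netuid_plus_one = netuid + 1
--     block_with_offset = current_block + netuid_plus_one
--     current_epoch = block_with_offset // tempo_plus_one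
--
--     reveal_epoch = current_epoch + subnet_reveal_period_epochs
--     reveal_block_number = reveal_epoch * tempo_plus_one - netuid_plus_one
--
--     blocks_until_reveal = max(reveal_block_number - current_block, 0)
--     time_until_reveal = blocks_until_reveal * block_time
--
--     while time_until_reveal < SUBTENSOR_PULSE_DELAY * PERIOD:
--         # If there's at least one block until the reveal, break early and don't force more lead time
--         if blocks_until_reveal > 0:
--             break
--         reveal_epoch += 1
--         reveal_block_number = reveal_epoch * tempo_plus_one - netuid_plus_one
--         blocks_until_reveal = max(reveal_block_number - current_block, 0)
--         time_until_reveal = blocks_until_reveal * block_time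
--
--     reveal_time = now + time_until_reveal
--     reveal_round = ((reveal_time - GENESIS_TIME + PERIOD - 1) // PERIOD) - SUBTENSOR_PULSE_DELAY
--     return reveal_round, reveal_time, time_until_reveal
-- ===== SOURCE B (Python) =====
-- SUBTENSOR_PULSE_DELAY = 24
--
-- PERIOD = 3
--
-- GENESIS_TIME = 1692803367
--
-- def compute_expected_reveal_round(
--     now: int,
--     tempo: int,
--     current_block: int,
--     netuid: int,
--     subnet_reveal_period_epochs: int,
--     block_time: int,
-- ):
--     # Closed form: no loop.  The reveal epoch is current_epoch + subnet_reveal_period_epochs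
--     # when that epoch's block is still ahead of us, otherwise the very next epoch boundary.
--     epoch_length = tempo + 1
--     offset = netuid + 1
--     current_epoch = (current_block + offset) // epoch_length
--     first = (current_epoch + subnet_reveal_period_epochs) * epoch_length - offset
--     if first > current_block:
--         reveal_block_number = first
--     else:
--         reveal_block_number = (current_epoch + 1) * epoch_length - offset
--     blocks_until_reveal = max(reveal_block_number - current_block, 0)
--     time_until_reveal = blocks_until_reveal * block_time
--     reveal_time = now + time_until_reveal
--     reveal_round = ((reveal_time - GENESIS_TIME + PERIOD - 1) // PERIOD) - SUBTENSOR_PULSE_DELAY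
--     return reveal_round, reveal_time, time_until_reveal
-- ===== Notes on version B (the rewrite author's own statement) =====
-- stated objective: simpler
-- what changed: Replaced A's while loop with a closed-form branch: the reveal epoch is current_epoch + subnet_reveal_period_epochs when that epoch's block is still ahead, otherwise current_epoch + 1 (the loop's fixed landing point).
import Mathlib
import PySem

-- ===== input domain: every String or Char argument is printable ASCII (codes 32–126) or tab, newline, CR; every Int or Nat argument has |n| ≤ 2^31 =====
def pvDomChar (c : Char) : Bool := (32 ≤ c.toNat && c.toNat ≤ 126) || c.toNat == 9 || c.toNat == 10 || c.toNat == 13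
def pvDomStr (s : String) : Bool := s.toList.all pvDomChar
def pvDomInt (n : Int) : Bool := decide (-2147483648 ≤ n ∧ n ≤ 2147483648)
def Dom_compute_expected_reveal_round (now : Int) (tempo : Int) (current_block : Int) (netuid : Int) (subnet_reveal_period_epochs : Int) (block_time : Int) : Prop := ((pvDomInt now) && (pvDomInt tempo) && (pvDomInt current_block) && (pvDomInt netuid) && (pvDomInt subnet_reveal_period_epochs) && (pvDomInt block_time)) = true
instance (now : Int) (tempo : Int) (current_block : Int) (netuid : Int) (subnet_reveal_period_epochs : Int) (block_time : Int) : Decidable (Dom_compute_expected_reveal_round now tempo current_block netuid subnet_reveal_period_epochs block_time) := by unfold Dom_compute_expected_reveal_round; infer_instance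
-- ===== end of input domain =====

-- B replaces A's while loop by a closed-form branch choosing the reveal epoch (simpler, no loop);
-- the equivalence is about the return value (A mutates nothing).

-- ===== PORT A =====
-- A's while loop, as structural recursion on fuel; the fuel supplied below exceeds the number
-- of iterations the Python loop performs on every input admitted by Pre_ (on excluded inputs
-- the Python loop never terminates).  State: (reveal_epoch, blocks_until_reveal, time_until_reveal).
def pvLoopA (T N cb bt : Int) : Nat → Int → Int → Int → Int
  | 0, _, _, time => time
  | k+1, e, blocks, time =>
    if time < 24 * 3 then
      if blocks > 0 then time
      else
        pvLoopA T N cb bt k (e + 1) (max ((e + 1) * T - N - cb) 0) (max ((e + 1) * T - N - cb) 0 * bt)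
    else time

def compute_expected_reveal_round (now : Int) (tempo : Int) (current_block : Int) (netuid : Int) (subnet_reveal_period_epochs : Int) (block_time : Int) : Int × Int × Int :=
  let tempo_plus_one := tempo + 1
  let netuid_plus_one := netuid + 1
  let block_with_offset := current_block + netuid_plus_one
  let current_epoch := PySem.Int.floordiv block_with_offset tempo_plus_one
  let reveal_epoch := current_epoch + subnet_reveal_period_epochs
  let reveal_block_number := reveal_epoch * tempo_plus_one - netuid_plus_one
  let blocks_until_reveal := max (reveal_block_number - current_block) 0
  let time_until_reveal := blocks_until_reveal * block_time
  let time := pvLoopA tempo_plus_one netuid_plus_one current_block block_time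
      ((1 - subnet_reveal_period_epochs).toNat + 2) reveal_epoch blocks_until_reveal time_until_reveal
  let reveal_time := now + time
  let reveal_round := PySem.Int.floordiv (reveal_time - 1692803367 + 3 - 1) 3 - 24
  (reveal_round, reveal_time, time)

-- ===== PORT B =====
def compute_expected_reveal_round_alt (now : Int) (tempo : Int) (current_block : Int) (netuid : Int) (subnet_reveal_period_epochs : Int) (block_time : Int) : Int × Int × Int :=
  let epoch_length := tempo + 1
  let offset := netuid + 1
  let current_epoch := PySem.Int.floordiv (current_block + offset) epoch_length
  let first := (current_epoch + subnet_reveal_period_epochs) * epoch_length - offset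
  let reveal_block_number := if first > current_block then first else (current_epoch + 1) * epoch_length - offset
  let blocks_until_reveal := max (reveal_block_number - current_block) 0
  let time_until_reveal := blocks_until_reveal * block_time
  let reveal_time := now + time_until_reveal
  let reveal_round := PySem.Int.floordiv (reveal_time - 1692803367 + 3 - 1) 3 - 24
  (reveal_round, reveal_time, time_until_reveal)

-- ===== PRECONDITION & SPEC =====
-- Pre_ excludes exactly the inputs where Python A does not return: tempo = -1 (ZeroDivisionError
-- on the epoch division) and tempo ≤ -2 with the first candidate reveal block not ahead of
-- current_block (there A's while loop never terminates, since advancing the epoch only moves the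
-- reveal block backwards).  A returns on every other input.
def Pre_compute_expected_reveal_round (now : Int) (tempo : Int) (current_block : Int) (netuid : Int) (subnet_reveal_period_epochs : Int) (block_time : Int) : Prop :=
  0 ≤ tempo ∨ (tempo ≤ -2 ∧ current_block <
    (PySem.Int.floordiv (current_block + netuid + 1) (tempo + 1) + subnet_reveal_period_epochs) * (tempo + 1) - (netuid + 1))
instance (now : Int) (tempo : Int) (current_block : Int) (netuid : Int) (subnet_reveal_period_epochs : Int) (block_time : Int) : Decidable (Pre_compute_expected_reveal_round now tempo current_block netuid subnet_reveal_period_epochs block_time) := by unfold Pre_compute_expected_reveal_round; infer_instance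

def pvWitness_compute_expected_reveal_round : Int × Int × Int × Int × Int × Int := (0, 10, 5, 1, 2, 12)

def Spec_compute_expected_reveal_round (now : Int) (tempo : Int) (current_block : Int) (netuid : Int) (subnet_reveal_period_epochs : Int) (block_time : Int) (out : Int × Int × Int) : Prop := out = compute_expected_reveal_round_alt now tempo current_block netuid subnet_reveal_period_epochs block_time
instance (now : Int) (tempo : Int) (current_block : Int) (netuid : Int) (subnet_reveal_period_epochs : Int) (block_time : Int) (out : Int × Int × Int) : Decidable (Spec_compute_expected_reveal_round now tempo current_block netuid subnet_reveal_period_epochs block_time out) := by unfold Spec_compute_expected_reveal_round; infer_instance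

-- ===== CLAIM (what is proved, stated in full; the proofs are below) =====
def Claim_equal_compute_expected_reveal_round : Prop := ∀ (now : Int) (tempo : Int) (current_block : Int) (netuid : Int) (subnet_reveal_period_epochs : Int) (block_time : Int), Dom_compute_expected_reveal_round now tempo current_block netuid subnet_reveal_period_epochs block_time → Pre_compute_expected_reveal_round now tempo current_block netuid subnet_reveal_period_epochs block_time → Spec_compute_expected_reveal_round now tempo current_block netuid subnet_reveal_period_epochs block_time (compute_expected_reveal_round now tempo current_block netuid subnet_reveal_period_epochs block_time)

-- ===== LEMMAS AND PROOFS =====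

-- If blocks_until_reveal is already positive, the loop returns its current time immediately.
lemma pvLoopA_break (T N cb bt : Int) (k : Nat) (e b t : Int) (hb : 0 < b) :
    pvLoopA T N cb bt (k + 1) e b t = t := by
  by_cases h1 : t < 24 * 3
  · simp only [pvLoopA, if_pos h1, if_pos hb]
  · simp only [pvLoopA, if_neg h1]

-- While the epoch is at most current_epoch, blocks_until_reveal stays 0 and the loop advances;
-- it stops at current_epoch + 1, the first epoch whose reveal block lies strictly beyond cb.
lemma pvLoopA_adv (T N cb bt ce : Int) (hT : 0 < T)
    (h1 : ce * T ≤ cb + N) (h2 : cb + N < (ce + 1) * T) :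
    ∀ (k : Nat) (e : Int), e ≤ ce → (ce + 1 - e).toNat < k →
      pvLoopA T N cb bt k e 0 0 = max ((ce + 1) * T - N - cb) 0 * bt := by
  intro k
  induction k with
  | zero => intro e _ hk; omega
  | succ k ih =>
    intro e he hk
    simp only [pvLoopA]
    rw [if_pos (by norm_num), if_neg (by omega)]
    by_cases hcase : e = ce
    · have hpos : (0:Int) < (e + 1) * T - N - cb := by rw [hcase]; omega
      have hbpos : (0:Int) < max ((e + 1) * T - N - cb) 0 := by omega
      obtain ⟨k', rfl⟩ : ∃ k', k = k' + 1 := ⟨k - 1, by omega⟩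
      rw [pvLoopA_break _ _ _ _ _ _ _ _ hbpos, hcase]
    · have he' : e + 1 ≤ ce := by omega
      have hzero : (e + 1) * T - N - cb ≤ 0 := by
        have : (e + 1) * T ≤ ce * T :=
          mul_le_mul_of_nonneg_right he' (by omega)
        omega
      have hmax : max ((e + 1) * T - N - cb) 0 = 0 := by omega
      rw [hmax, zero_mul]
      exact ih (e + 1) he' (by omega)

-- The loop in closed form: its result is B's time_until_reveal.
lemma pvLoopA_closed (T N cb bt sr ce : Int)
    (hce : PySem.Int.floordiv (cb + N) T = ce)
    (hpre : 0 < T ∨ cb < (ce + sr) * T - N) :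
    pvLoopA T N cb bt ((1 - sr).toNat + 2) (ce + sr)
        (max ((ce + sr) * T - N - cb) 0) (max ((ce + sr) * T - N - cb) 0 * bt)
      = max ((if (ce + sr) * T - N > cb then (ce + sr) * T - N else (ce + 1) * T - N) - cb) 0 * bt := by
  by_cases hpos : (ce + sr) * T - N > cb
  · rw [if_pos hpos]
    exact pvLoopA_break _ _ _ _ _ _ _ _ (by omega)
  · rw [if_neg hpos]
    have hT : 0 < T := by
      rcases hpre with h | h
      · exact h
      · omega
    have hbnd := (PySem.Int.floordiv_eq_iff_of_pos hT).mp hce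
    have hlt : (ce + sr) * T < (ce + 1) * T := by omega
    have hsr : ce + sr ≤ ce := by
      have := lt_of_mul_lt_mul_right hlt (le_of_lt hT)
      omega
    have hmax : max ((ce + sr) * T - N - cb) 0 = 0 := by omega
    rw [hmax, zero_mul]
    exact pvLoopA_adv T N cb bt ce hT hbnd.1 hbnd.2 _ (ce + sr) hsr (by omega)

-- ===== VERDICT (by name: the statement is the Claim_ definition above) =====
theorem compute_expected_reveal_round_spec : Claim_equal_compute_expected_reveal_round := by
  intro now tempo cb nu sr bt _ hpre
  unfold Spec_compute_expected_reveal_round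
  have hpre' : 0 < tempo + 1 ∨
      cb < (PySem.Int.floordiv (cb + (nu + 1)) (tempo + 1) + sr) * (tempo + 1) - (nu + 1) := by
    rcases hpre with h | ⟨_, h⟩
    · left; omega
    · right
      rw [show cb + (nu + 1) = cb + nu + 1 by ring]
      exact h
  simp only [compute_expected_reveal_round, compute_expected_reveal_round_alt]
  rw [pvLoopA_closed (tempo + 1) (nu + 1) cb bt sr _ rfl hpre']
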